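-- pv_equiv track=rewrite | github.com/Introduction-to-Programming-OSOWSKI/4-7-remove-evens-noraahlman23 | main.py | removeEvens
-- ===== SOURCE A (Python) =====
-- def removeEvens(k):
--     potato = k
--     numPopped = 0
--     for i in range (0, len(potato)):
--         if potato[i - numPopped] % 2  == 0 and potato [i - numPopped] != 0:
--             potato.pop(i - numPopped)
--             numPopped = numPopped + 1
--
--     return potato
-- ===== SOURCE B (Python) =====
-- def removeEvens(k):
--     # single-pass in-place compaction: overwrite kept elements at a write index, truncate tail
--     w = 0
--     for x in k:
--         if x % 2 != 0 or x == 0: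
--             k[w] = x
--             w += 1
--     del k[w:]
--     return k
-- ===== Notes on version B (the rewrite author's own statement) =====
-- stated objective: faster
-- what changed: Replaces the pop-inside-index-loop (each pop shifts the tail) with a single-pass write-index compaction that overwrites kept elements in place and truncates the tail once, keeping the same in-place, same-object contract.
import Mathlib
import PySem

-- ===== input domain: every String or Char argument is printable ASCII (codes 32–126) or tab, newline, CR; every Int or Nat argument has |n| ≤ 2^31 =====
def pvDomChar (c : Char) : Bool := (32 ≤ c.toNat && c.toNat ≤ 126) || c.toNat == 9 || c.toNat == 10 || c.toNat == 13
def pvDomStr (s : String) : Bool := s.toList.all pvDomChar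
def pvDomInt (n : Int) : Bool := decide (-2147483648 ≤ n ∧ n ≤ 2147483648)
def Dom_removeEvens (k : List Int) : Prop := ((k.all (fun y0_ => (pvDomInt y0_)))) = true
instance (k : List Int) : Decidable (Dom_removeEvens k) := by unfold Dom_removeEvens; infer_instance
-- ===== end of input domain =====

-- B replaces A's quadratic pop-inside-index-loop by a single-pass in-place write-index
-- compaction (objective: faster); both mutate the argument list in place in Python, and
-- the equivalence proved here is about the returned value.

-- ===== PORT A =====
-- one iteration of A's 'for i in range(0, len(potato))' loop; state = (potato, numPopped)
def removeEvensStep (st : List Int × Int) (i : Int) : List Int × Int :=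
  match PySem.List.pyGet? st.1 (i - st.2) with
  | none => st   -- unreachable: the index i - numPopped is always in range
  | some v =>
    if PySem.Int.mod v 2 = 0 ∧ v ≠ 0 then
      match PySem.List.pop? st.1 (i - st.2) with
      | none => st   -- unreachable, as above
      | some r => (r.2, st.2 + 1)
    else st

def removeEvens (k : List Int) : List Int :=
  ((PySem.List.pyRange 0 (k.length : Int) 1).foldl removeEvensStep (k, 0)).1

-- ===== PORT B =====
-- one iteration of B's 'for x in k' loop; state = (the list being compacted, write index w)
def removeEvensAltStep (st : List Int × Nat) (x : Int) : List Int × Nat :=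
  if PySem.Int.mod x 2 ≠ 0 ∨ x = 0 then (st.1.set st.2 x, st.2 + 1) else st

def removeEvens_alt (k : List Int) : List Int :=
  let st := k.foldl removeEvensAltStep (k, 0)
  st.1.take st.2   -- 'del k[w:]' then 'return k'

-- ===== PRECONDITION & SPEC =====
def Spec_removeEvens (k : List Int) (out : List Int) : Prop := out = removeEvens_alt k
instance (k : List Int) (out : List Int) : Decidable (Spec_removeEvens k out) := by unfold Spec_removeEvens; infer_instance

-- ===== CLAIM (what is proved, stated in full; the proofs are below) =====
def Claim_equal_removeEvens : Prop := ∀ (k : List Int), Dom_removeEvens k → Spec_removeEvens k (removeEvens k)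

-- ===== LEMMAS AND PROOFS =====

-- the common "keep" predicate: odd, or zero
def pvKeep (x : Int) : Bool := decide (PySem.Int.mod x 2 ≠ 0 ∨ x = 0)

lemma erase_mid (x : Int) (suf : List Int) :
    ∀ (pre : List Int), (pre ++ x :: suf).eraseIdx pre.length = pre ++ suf := by
  intro pre; induction pre with
  | nil => simp
  | cons a t ih => simp [ih]

lemma loopA (suf : List Int) :
    ∀ (pre : List Int) (p i : Int), i - p = (pre.length : Int) →
    ((PySem.List.pyRange i (i + (suf.length : Int)) 1).foldl removeEvensStep (pre ++ suf, p)).1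
      = pre ++ suf.filter pvKeep := by
  induction suf with
  | nil =>
    intro pre p i hi
    rw [PySem.List.pyRange_one_eq_nil (by simp)]
    simp
  | cons x suf ih =>
    intro pre p i hi
    rw [PySem.List.pyRange_one_cons (by push_cast [List.length_cons]; omega)]
    rw [List.foldl_cons]
    have hget : PySem.List.pyGet? (pre ++ x :: suf) (i - p) = some x := by
      rw [hi]; exact PySem.List.pyGet?_append_length pre suf x
    by_cases h : PySem.Int.mod x 2 = 0 ∧ x ≠ 0
    · have hpop : PySem.List.pop? (pre ++ x :: suf) (i - p) = some (x, pre ++ suf) := by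
        rw [hi]
        rw [PySem.List.pop?_natCast (pre ++ x :: suf) pre.length (by simp)]
        simp [erase_mid, List.getElem_append_right]
      have hfx : pvKeep x = false := by
        simp only [pvKeep, decide_eq_false_iff_not]
        tauto
      simp only [removeEvensStep, hget, hpop, if_pos h]
      have := ih pre (p + 1) (i + 1) (by omega)
      rw [show i + ((x :: suf).length : Int) = (i + 1) + (suf.length : Int) by push_cast [List.length_cons]; omega]
      rw [this]
      simp [hfx]
    · have hfx : pvKeep x = true := by
        simp only [pvKeep, decide_eq_true_iff]
        tauto
      simp only [removeEvensStep, hget, if_neg h]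
      have := ih (pre ++ [x]) p (i + 1) (by simp only [List.length_append, List.length_cons, List.length_nil]; push_cast; omega)
      rw [show i + ((x :: suf).length : Int) = (i + 1) + (suf.length : Int) by push_cast [List.length_cons]; omega]
      rw [show pre ++ x :: suf = (pre ++ [x]) ++ suf by simp]
      rw [this]
      simp [hfx]

lemma removeEvens_eq_filter (k : List Int) : removeEvens k = k.filter pvKeep := by
  unfold removeEvens
  have := loopA k [] 0 0 (by simp)
  simpa using this

lemma take_set_succ (arr : List Int) (w : Nat) (x : Int) (h : w < arr.length) :
    (arr.set w x).take (w + 1) = arr.take w ++ [x] := by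
  rw [List.take_add_one]
  simp [h, List.take_set, List.set_eq_of_length_le]

lemma loopB (suf : List Int) :
    ∀ (arr : List Int) (w : Nat), w + suf.length ≤ arr.length →
    (let st := suf.foldl removeEvensAltStep (arr, w); st.1.take st.2)
      = arr.take w ++ suf.filter pvKeep := by
  induction suf with
  | nil => intro arr w h; simp
  | cons x suf ih =>
    intro arr w h
    simp only [List.foldl_cons, removeEvensAltStep]
    by_cases hx : PySem.Int.mod x 2 ≠ 0 ∨ x = 0
    · have hw : w < arr.length := by simp at h; omega
      rw [if_pos hx]
      have := ih (arr.set w x) (w + 1) (by simp at h ⊢; omega)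
      simp only [this]
      rw [take_set_succ arr w x hw]
      have hfx : pvKeep x = true := by simp only [pvKeep, decide_eq_true_iff]; tauto
      simp [hfx]
    · rw [if_neg hx]
      have := ih arr w (by simp at h; omega)
      simp only [this]
      have hfx : pvKeep x = false := by
        simp only [pvKeep, decide_eq_false_iff_not]; tauto
      simp [hfx]

lemma removeEvens_alt_eq_filter (k : List Int) : removeEvens_alt k = k.filter pvKeep := by
  unfold removeEvens_alt
  have := loopB k k 0 (by simp)
  simpa using this

-- ===== VERDICT (by name: the statement is the Claim_ definition above) =====
theorem removeEvens_spec : Claim_equal_removeEvens := by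
  intro k _
  unfold Spec_removeEvens
  rw [removeEvens_eq_filter, removeEvens_alt_eq_filter]
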